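-- pv_equiv track=rewrite | github.com/Ocularitas/automatic-garbanzo | ingestion/chunker.py | _candidate_boundaries
-- ===== SOURCE A (Python) =====
-- def _candidate_boundaries(text: str) -> list[int]:
--     """Indices where a chunk could cleanly end (after a blank line)."""
--     out = []
--     i = 0
--     while True:
--         j = text.find("\n\n", i)
--         if j == -1:
--             break
--         out.append(j + 2)
--         i = j + 2
--     return out
-- ===== SOURCE B (Python) =====
-- def _candidate_boundaries(text: str) -> list[int]:
--     """Indices where a chunk could cleanly end (after a blank line)."""
--     out = []
--     cum = 0
--     for part in text.split("\n\n")[:-1]: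
--         cum += len(part) + 2
--         out.append(cum)
--     return out
-- ===== Notes on version B (the rewrite author's own statement) =====
-- stated objective: simpler
-- what changed: Replaces the while-True find-then-advance probing loop with a single split on the blank-line separator followed by a prefix-sum over the lengths of the all-but-last pieces.
import Mathlib
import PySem

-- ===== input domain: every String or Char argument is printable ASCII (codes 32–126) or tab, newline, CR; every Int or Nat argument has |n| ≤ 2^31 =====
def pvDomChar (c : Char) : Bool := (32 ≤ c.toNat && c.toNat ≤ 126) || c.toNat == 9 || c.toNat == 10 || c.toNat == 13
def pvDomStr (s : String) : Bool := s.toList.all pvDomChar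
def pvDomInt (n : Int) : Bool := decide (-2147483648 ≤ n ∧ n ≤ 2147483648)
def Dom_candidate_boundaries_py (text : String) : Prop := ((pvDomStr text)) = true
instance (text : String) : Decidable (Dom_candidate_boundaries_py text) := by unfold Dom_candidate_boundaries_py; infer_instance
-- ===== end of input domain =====

-- B replaces A's while-True find("\n\n", i) probing loop by one split("\n\n") followed by a
-- prefix-sum over the lengths of the all-but-last pieces (objective: simpler).

-- ===== PORT A =====
-- A's while-True loop: j = text.find("\n\n", i); stop at -1, else append j+2 and continue at i = j+2.
-- fuel only makes the loop total: fuel = len(text)+1 steps always suffice (proved in pvALoop_eq below)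
def pvALoop (cs : List Char) (fuel : Nat) (i : Nat) (out : List Int) : List Int :=
  match fuel with
  | 0 => out
  | fuel + 1 =>
    let j := PySem.Chars.findFrom cs ['\n','\n'] (i : Int) none
    if j = -1 then out
    else pvALoop cs fuel (j.toNat + 2) (out ++ [j + 2])

def candidate_boundaries_py (text : String) : List Int :=
  pvALoop text.toList (text.toList.length + 1) 0 []

-- ===== PORT B =====
def candidate_boundaries_py_alt (text : String) : List Int :=
  ((PySem.List.slice (PySem.Chars.splitOn text.toList ['\n','\n']) none (some (-1))).foldl
    (fun (st : Int × List Int) part =>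
      (st.1 + part.length + 2, st.2 ++ [st.1 + (part.length : Int) + 2]))
    (0, [])).2

-- ===== PRECONDITION & SPEC =====
def Spec_candidate_boundaries_py (text : String) (out : List Int) : Prop := out = candidate_boundaries_py_alt text
instance (text : String) (out : List Int) : Decidable (Spec_candidate_boundaries_py text out) := by unfold Spec_candidate_boundaries_py; infer_instance

-- ===== CLAIM (what is proved, stated in full; the proofs are below) =====
def Claim_equal_candidate_boundaries_py : Prop := ∀ (text : String), Dom_candidate_boundaries_py text → Spec_candidate_boundaries_py text (candidate_boundaries_py text)

-- ===== LEMMAS AND PROOFS =====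

-- apply f to the head piece only
def pvMapHead (f : List Char → List Char) : List (List Char) → List (List Char)
  | [] => []
  | p :: ps => f p :: ps

-- clean recursive model of splitting on "\n\n"
def pvSplits (l : List Char) : List (List Char) :=
  if h : ['\n','\n'].isPrefixOf l then
    have hlen : 2 ≤ l.length := by
      have := (List.isPrefixOf_iff_prefix.mp h).length_le
      simpa using this
    [] :: pvSplits (l.drop 2)
  else
    match l with
    | [] => [[]]
    | c :: rest => pvMapHead (fun p => c :: p) (pvSplits rest)
termination_by l.length
decreasing_by
  · simp only [List.length_drop]; omega
  · simp

-- boundary offsets from piece lengths: cumulative len+2 over all but the last piece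
def pvSums (base : Int) : List (List Char) → List Int
  | [] => []
  | [_] => []
  | p :: q :: ps =>
    (base + p.length + 2) :: pvSums (base + p.length + 2) (q :: ps)

lemma pvSplits_pos {l : List Char} (h : ['\n','\n'].isPrefixOf l) :
    pvSplits l = [] :: pvSplits (l.drop 2) := by
  rw [pvSplits]; simp [h]

lemma pvSplits_nil : pvSplits [] = [[]] := by
  rw [pvSplits]; simp [List.isPrefixOf]

lemma pvSplits_neg {c : Char} {rest : List Char}
    (h : ¬ ['\n','\n'].isPrefixOf (c :: rest)) :
    pvSplits (c :: rest) = pvMapHead (fun p => c :: p) (pvSplits rest) := by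
  rw [pvSplits]; simp [h]

lemma pvSplits_ne_nil (l : List Char) : pvSplits l ≠ [] := by
  fun_induction pvSplits l with
  | case1 x h hlen ih => simp
  | case2 h => simp
  | case3 c rest h ih =>
    rcases h' : pvSplits rest with _ | ⟨p, ps⟩
    · exact absurd h' ih
    · simp [pvMapHead]

lemma pvGo_eq (fuel : Nat) (l cur : List Char) (acc : List (List Char))
    (hf : l.length < fuel) :
    PySem.Chars.splitOn.go ['\n','\n'] fuel l cur acc =
      acc.reverse ++ pvMapHead (fun p => cur.reverse ++ p) (pvSplits l) := by
  induction fuel generalizing l cur acc with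
  | zero => omega
  | succ fuel ih =>
    cases l with
    | nil =>
      simp [PySem.Chars.splitOn.go, pvSplits_nil, pvMapHead]
    | cons c rest =>
      by_cases hp : ['\n','\n'].isPrefixOf (c :: rest)
      · rw [show PySem.Chars.splitOn.go ['\n','\n'] (fuel+1) (c :: rest) cur acc =
            PySem.Chars.splitOn.go ['\n','\n'] fuel ((c :: rest).drop 2) [] (cur.reverse :: acc) by
              simp [PySem.Chars.splitOn.go, hp]]
        rw [ih _ _ _ (by simp only [List.length_drop]; simp at hf ⊢; omega)]
        rw [pvSplits_pos hp]
        rcases h' : pvSplits ((c :: rest).drop 2) with _ | ⟨p, ps⟩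
        · exact absurd h' (pvSplits_ne_nil _)
        · simp [pvMapHead]
      · rw [show PySem.Chars.splitOn.go ['\n','\n'] (fuel+1) (c :: rest) cur acc =
            PySem.Chars.splitOn.go ['\n','\n'] fuel rest (c :: cur) acc by
              simp [PySem.Chars.splitOn.go, hp]]
        rw [ih _ _ _ (by simp at hf ⊢; omega)]
        rw [pvSplits_neg hp]
        rcases h' : pvSplits rest with _ | ⟨p, ps⟩
        · exact absurd h' (pvSplits_ne_nil _)
        · simp [pvMapHead]

lemma pvSplitOn_eq (l : List Char) :
    PySem.Chars.splitOn l ['\n','\n'] = pvSplits l := by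
  unfold PySem.Chars.splitOn
  rw [pvGo_eq _ _ _ _ (by omega)]
  rcases h' : pvSplits l with _ | ⟨p, ps⟩
  · exact absurd h' (pvSplits_ne_nil _)
  · simp [pvMapHead]

lemma pvSplits_of_not_infix {l : List Char} (h : ¬ ['\n','\n'] <:+: l) :
    pvSplits l = [l] := by
  induction l with
  | nil => exact pvSplits_nil
  | cons c rest ih =>
    have hp : ¬ ['\n','\n'].isPrefixOf (c :: rest) := by
      intro hpre
      exact h (List.isPrefixOf_iff_prefix.mp hpre).isInfix
    rw [pvSplits_neg hp, ih (fun hinf => h (List.infix_cons hinf)), pvMapHead]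

lemma pvSplits_first_occ :
    ∀ (f : Nat) (l : List Char), ['\n','\n'] <+: l.drop f →
      (∀ i < f, ¬ ['\n','\n'] <+: l.drop i) →
      pvSplits l = l.take f :: pvSplits (l.drop (f + 2)) := by
  intro f
  induction f with
  | zero =>
    intro l hocc _
    simp only [List.drop_zero] at hocc
    rw [pvSplits_pos (List.isPrefixOf_iff_prefix.mpr hocc)]
    simp
  | succ f ih =>
    intro l hocc hmin
    have hnp : ¬ ['\n','\n'] <+: l := by simpa using hmin 0 (by omega)
    cases l with
    | nil => simp at hocc
    | cons c rest =>
      have hp : ¬ ['\n','\n'].isPrefixOf (c :: rest) := fun hb =>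
        hnp (List.isPrefixOf_iff_prefix.mp hb)
      rw [pvSplits_neg hp]
      rw [ih rest (by simpa using hocc) (fun i hi => by simpa using hmin (i+1) (by omega))]
      simp [pvMapHead]

lemma pvALoop_eq (cs : List Char) :
    ∀ (fuel i : Nat) (out : List Int), i ≤ cs.length → cs.length - i < fuel →
    pvALoop cs fuel i out = out ++ pvSums (i : Int) (pvSplits (cs.drop i)) := by
  intro fuel
  induction fuel with
  | zero => intro i out _ hf; omega
  | succ fuel ih =>
    intro i out hi hf
    rw [pvALoop]
    by_cases h : PySem.Chars.findFrom cs ['\n','\n'] (i : Int) none = -1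
    · rw [if_pos h]
      rw [PySem.Chars.findFrom_natCast cs ['\n','\n'] i hi] at h
      have hfind : PySem.Chars.find (cs.drop i) ['\n','\n'] = -1 := by
        by_cases hc : PySem.Chars.find (cs.drop i) ['\n','\n'] = -1
        · exact hc
        · rw [if_neg hc] at h
          have h1 := PySem.Chars.neg_one_le_find (cs.drop i) ['\n','\n']
          omega
      have hni : ¬ ['\n','\n'] <:+: (cs.drop i) :=
        (PySem.Chars.find_eq_neg_one_iff _ _).mp hfind
      rw [pvSplits_of_not_infix hni]
      simp [pvSums]
    · rw [if_neg h]
      have hcast := PySem.Chars.findFrom_natCast cs ['\n','\n'] i hi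
      have hfne : PySem.Chars.find (cs.drop i) ['\n','\n'] ≠ -1 := by
        intro hc
        exact h (by rw [hcast, if_pos hc])
      have hf0 : 0 ≤ PySem.Chars.find (cs.drop i) ['\n','\n'] := by
        have h1 := PySem.Chars.neg_one_le_find (cs.drop i) ['\n','\n']
        omega
      have hjdef : PySem.Chars.findFrom cs ['\n','\n'] (i : Int) none
          = (i : Int) + PySem.Chars.find (cs.drop i) ['\n','\n'] := by
        rw [hcast, if_neg hfne]
      set j := PySem.Chars.findFrom cs ['\n','\n'] (i : Int) none with hj
      have hsp := PySem.Chars.find_spec hf0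
      have hlen2 : (PySem.Chars.find (cs.drop i) ['\n','\n']).toNat + 2 ≤ (cs.drop i).length := by
        have hl := hsp.1.length_le
        simp only [List.length_drop, List.length_cons, List.length_nil] at hl ⊢
        omega
      have hil : i ≤ cs.length := hi
      have hi' : j.toNat + 2 ≤ cs.length := by
        simp only [List.length_drop] at hlen2
        omega
      rw [ih (j.toNat + 2) (out ++ [j + 2]) hi' (by omega)]
      have hdd : (cs.drop i).drop ((PySem.Chars.find (cs.drop i) ['\n','\n']).toNat + 2)
          = cs.drop (j.toNat + 2) := by
        rw [List.drop_drop]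
        congr 1
        omega
      have hfo := pvSplits_first_occ (PySem.Chars.find (cs.drop i) ['\n','\n']).toNat
        (cs.drop i) hsp.1 hsp.2
      rw [hdd] at hfo
      rw [hfo]
      have htake : ((cs.drop i).take (PySem.Chars.find (cs.drop i) ['\n','\n']).toNat).length
          = (PySem.Chars.find (cs.drop i) ['\n','\n']).toNat := by
        simp only [List.length_take, List.length_drop]
        omega
      rcases hq : pvSplits (cs.drop (j.toNat + 2)) with _ | ⟨q, ps⟩
      · exact absurd hq (pvSplits_ne_nil _)
      · simp only [pvSums, htake]
        rw [show ((i : Int) + ((PySem.Chars.find (cs.drop i) ['\n','\n']).toNat : Int) + 2) = j + 2 by omega]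
        rw [show (((j.toNat + 2 : Nat) : Int)) = j + 2 by omega]
        simp

-- B's foldl over all-but-last pieces computes pvSums
lemma pvFold_eq (ps : List (List Char)) :
    ∀ (base : Int) (acc : List Int),
    ((ps.dropLast).foldl
      (fun (st : Int × List Int) part =>
        (st.1 + part.length + 2, st.2 ++ [st.1 + (part.length : Int) + 2]))
      (base, acc)).2 = acc ++ pvSums base ps := by
  induction ps with
  | nil => intro base acc; simp [pvSums]
  | cons p tail ih =>
    intro base acc
    cases tail with
    | nil => simp [pvSums]
    | cons q ps' =>
      rw [List.dropLast_cons_of_ne_nil (by simp), List.foldl_cons, ih]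
      simp [pvSums]

-- ===== VERDICT (by name: the statement is the Claim_ definition above) =====
theorem candidate_boundaries_py_spec : Claim_equal_candidate_boundaries_py := by
  intro text _
  unfold Spec_candidate_boundaries_py candidate_boundaries_py candidate_boundaries_py_alt
  rw [pvALoop_eq text.toList (text.toList.length + 1) 0 [] (by omega) (by omega), pvSplitOn_eq, PySem.List.slice_to_neg_one, pvFold_eq]
  simp
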